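-- pv_equiv track=rewrite | github.com/TimAlanAQISystem/AQI-Autonomous-Quantum-Intelligence | regime_queue_integrator.py | _business_to_vertical
-- ===== SOURCE A (Python) =====
-- _BUSINESS_TYPE_TO_VERTICAL = {
--     "restaurant": "restaurant",
--     "dining": "restaurant",
--     "cafe": "restaurant",
--     "bar": "restaurant",
--     "pizzeria": "restaurant",
--     "pizza": "restaurant",
--     "bakery": "restaurant",
--     "deli": "restaurant",
--     "grill": "restaurant",
--     "taco": "restaurant",
--     "sushi": "restaurant",
--     "bbq": "restaurant",
--     "coffee": "restaurant",
--     "food": "restaurant",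
--     "catering": "restaurant",
--     "contractor": "contractor",
--     "construction": "contractor",
--     "plumbing": "contractor",
--     "plumber": "contractor",
--     "electrician": "contractor",
--     "electrical": "contractor",
--     "hvac": "contractor",
--     "roofing": "contractor",
--     "roofer": "contractor",
--     "landscaping": "contractor",
--     "landscape": "contractor",
--     "lawn": "contractor",
--     "tree": "contractor",
--     "fence": "contractor",
--     "paving": "contractor",
--     "concrete": "contractor",
--     "painting": "contractor",
--     "handyman": "contractor",
--     "remodeling": "contractor",
--     "retail": "retail",
--     "store": "retail",
--     "shop": "retail",
--     "boutique": "retail",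
--     "pharmacy": "retail",
--     "auto": "auto",
--     "automotive": "auto",
--     "car": "auto",
--     "mechanic": "auto",
--     "tire": "auto",
--     "body shop": "auto",
--     "dealer": "auto",
--     "dealership": "auto",
--     "salon": "services",
--     "spa": "services",
--     "barber": "services",
--     "beauty": "services",
--     "tattoo": "services",
--     "pet": "services",
--     "cleaning": "services",
--     "laundry": "services",
--     "studio": "services",
--     "dental": "medical",
--     "dentist": "medical",
--     "doctor": "medical",
--     "medical": "medical",
--     "clinic": "medical",
--     "veterinary": "medical",
--     "vet": "medical",
--     "chiropractic": "medical",
--     "hotel": "hospitality",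
--     "motel": "hospitality",
--     "inn": "hospitality",
--     "lodge": "hospitality",
--     "gym": "fitness",
--     "fitness": "fitness",
--     "yoga": "fitness",
-- }
--
-- def _business_to_vertical(business_type: str) -> str:
--     """Map business_type string to standardized vertical."""
--     if not business_type:
--         return "general"
--     bt_lower = business_type.lower().strip()
--     # Try direct match first
--     if bt_lower in _BUSINESS_TYPE_TO_VERTICAL:
--         return _BUSINESS_TYPE_TO_VERTICAL[bt_lower]
--     # Try substring match — longest key first to avoid "shop" beating "body shop"
--     for key, vertical in sorted(_BUSINESS_TYPE_TO_VERTICAL.items(), key=lambda x: len(x[0]), reverse=True):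
--         if key in bt_lower:
--             return vertical
--     return "general"
-- ===== SOURCE B (Python) =====
-- _VERTICAL_KEYWORDS = [
--     ("restaurant", "restaurant,dining,cafe,bar,pizzeria,pizza,bakery,deli,grill,taco,sushi,bbq,coffee,food,catering"),
--     ("contractor", "contractor,construction,plumbing,plumber,electrician,electrical,hvac,roofing,roofer,landscaping,landscape,lawn,tree,fence,paving,concrete,painting,handyman,remodeling"),
--     ("retail", "retail,store,shop,boutique,pharmacy"),
--     ("auto", "auto,automotive,car,mechanic,tire,body shop,dealer,dealership"),
--     ("services", "salon,spa,barber,beauty,tattoo,pet,cleaning,laundry,studio"),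
--     ("medical", "dental,dentist,doctor,medical,clinic,veterinary,vet,chiropractic"),
--     ("hospitality", "hotel,motel,inn,lodge"),
--     ("fitness", "gym,fitness,yoga"),
-- ]
--
-- def _business_to_vertical(business_type: str) -> str:
--     """Map business_type string to standardized vertical (grouped keyword table, one nested pass)."""
--     if not business_type:
--         return "general"
--     s = business_type.lower().strip()
--     best_len = 0
--     best_vert = "general"
--     for vertical, keywords in _VERTICAL_KEYWORDS:
--         for k in keywords.split(","):
--             if best_len < len(k) and k in s:
--                 best_len = len(k)
--                 best_vert = vertical
--     return best_vert
-- ===== Notes on version B (the rewrite author's own statement) =====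
-- stated objective: alternative
-- what changed: Replaced A's per-key dict, direct-match branch and sort-then-scan with a compact table of comma-separated keywords grouped by vertical and one nested pass keeping a (best_len, best_vert) accumulator; the exact-match branch is subsumed because an exact key is always the strictly longest substring match, and first-wins on equal lengths reproduces the stable sort's tie-break.
import Mathlib
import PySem

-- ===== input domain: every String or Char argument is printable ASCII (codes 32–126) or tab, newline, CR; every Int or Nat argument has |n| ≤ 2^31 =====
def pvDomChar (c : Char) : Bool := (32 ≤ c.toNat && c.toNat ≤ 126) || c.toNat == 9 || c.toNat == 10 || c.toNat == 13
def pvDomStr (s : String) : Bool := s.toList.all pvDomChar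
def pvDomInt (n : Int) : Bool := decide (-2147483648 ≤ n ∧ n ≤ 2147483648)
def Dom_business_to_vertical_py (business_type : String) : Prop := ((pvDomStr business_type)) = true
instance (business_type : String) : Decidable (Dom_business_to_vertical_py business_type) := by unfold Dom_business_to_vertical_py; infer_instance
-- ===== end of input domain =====

-- B replaces A's per-key dict, direct-match branch and sort-then-scan with a table of
-- comma-separated keywords grouped by vertical and one nested pass keeping the longest match;
-- objective: alternative (same result, no sort, no exact-match branch).

-- ===== PORT A =====
-- the module-level dict _BUSINESS_TYPE_TO_VERTICAL, in insertion order (keys are distinct)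
def pvTbl : List (String × String) := [
  ("restaurant", "restaurant"),
  ("dining", "restaurant"),
  ("cafe", "restaurant"),
  ("bar", "restaurant"),
  ("pizzeria", "restaurant"),
  ("pizza", "restaurant"),
  ("bakery", "restaurant"),
  ("deli", "restaurant"),
  ("grill", "restaurant"),
  ("taco", "restaurant"),
  ("sushi", "restaurant"),
  ("bbq", "restaurant"),
  ("coffee", "restaurant"),
  ("food", "restaurant"),
  ("catering", "restaurant"),
  ("contractor", "contractor"),
  ("construction", "contractor"),
  ("plumbing", "contractor"),
  ("plumber", "contractor"),
  ("electrician", "contractor"),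
  ("electrical", "contractor"),
  ("hvac", "contractor"),
  ("roofing", "contractor"),
  ("roofer", "contractor"),
  ("landscaping", "contractor"),
  ("landscape", "contractor"),
  ("lawn", "contractor"),
  ("tree", "contractor"),
  ("fence", "contractor"),
  ("paving", "contractor"),
  ("concrete", "contractor"),
  ("painting", "contractor"),
  ("handyman", "contractor"),
  ("remodeling", "contractor"),
  ("retail", "retail"),
  ("store", "retail"),
  ("shop", "retail"),
  ("boutique", "retail"),
  ("pharmacy", "retail"),
  ("auto", "auto"),
  ("automotive", "auto"),
  ("car", "auto"),
  ("mechanic", "auto"),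
  ("tire", "auto"),
  ("body shop", "auto"),
  ("dealer", "auto"),
  ("dealership", "auto"),
  ("salon", "services"),
  ("spa", "services"),
  ("barber", "services"),
  ("beauty", "services"),
  ("tattoo", "services"),
  ("pet", "services"),
  ("cleaning", "services"),
  ("laundry", "services"),
  ("studio", "services"),
  ("dental", "medical"),
  ("dentist", "medical"),
  ("doctor", "medical"),
  ("medical", "medical"),
  ("clinic", "medical"),
  ("veterinary", "medical"),
  ("vet", "medical"),
  ("chiropractic", "medical"),
  ("hotel", "hospitality"),
  ("motel", "hospitality"),
  ("inn", "hospitality"),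
  ("lodge", "hospitality"),
  ("gym", "fitness"),
  ("fitness", "fitness"),
  ("yoga", "fitness")]

def business_to_vertical_py (business_type : String) : String :=
  if business_type = "" then "general"
  else
    let bt := PySem.Str.strip (PySem.Str.lower business_type)
    -- direct match: dict membership + lookup = first (unique) pair with this key
    match pvTbl.find? (fun kv => kv.1 == bt) with
    | some kv => kv.2
    | none =>
      -- substring match over the items sorted by key length, longest first (stable)
      match (PySem.List.sorted pvTbl (fun kv => PySem.Str.len kv.1) true).find?
              (fun kv => PySem.Str.isIn kv.1 bt) with
      | some kv => kv.2
      | none => "general"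

-- ===== PORT B =====
-- the module-level list _VERTICAL_KEYWORDS of Source B: keywords grouped by vertical, comma-separated
def pvGroups : List (String × String) := [
  ("restaurant", "restaurant,dining,cafe,bar,pizzeria,pizza,bakery,deli,grill,taco,sushi,bbq,coffee,food,catering"),
  ("contractor", "contractor,construction,plumbing,plumber,electrician,electrical,hvac,roofing,roofer,landscaping,landscape,lawn,tree,fence,paving,concrete,painting,handyman,remodeling"),
  ("retail", "retail,store,shop,boutique,pharmacy"),
  ("auto", "auto,automotive,car,mechanic,tire,body shop,dealer,dealership"),
  ("services", "salon,spa,barber,beauty,tattoo,pet,cleaning,laundry,studio"),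
  ("medical", "dental,dentist,doctor,medical,clinic,veterinary,vet,chiropractic"),
  ("hospitality", "hotel,motel,inn,lodge"),
  ("fitness", "gym,fitness,yoga")]

def business_to_vertical_py_alt (business_type : String) : String :=
  if business_type = "" then "general"
  else
    let s := PySem.Str.strip (PySem.Str.lower business_type)
    -- nested pass: (best_len, best_vert) accumulator, strict > keeps the first longest match
    (pvGroups.foldl (fun st vk =>
        ((PySem.Str.split? vk.2 ",").getD []).foldl (fun st k =>
            if decide (st.1 < PySem.Str.len k) && PySem.Str.isIn k s
            then (PySem.Str.len k, vk.1) else st) st)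
      ((0 : Int), "general")).2

-- ===== PRECONDITION & SPEC =====
def Spec_business_to_vertical_py (business_type : String) (out : String) : Prop := out = business_to_vertical_py_alt business_type
instance (business_type : String) (out : String) : Decidable (Spec_business_to_vertical_py business_type out) := by unfold Spec_business_to_vertical_py; infer_instance

-- ===== CLAIM (what is proved, stated in full; the proofs are below) =====
def Claim_equal_business_to_vertical_py : Prop := ∀ (business_type : String), Dom_business_to_vertical_py business_type → Spec_business_to_vertical_py business_type (business_to_vertical_py business_type)

-- ===== LEMMAS AND PROOFS =====

-- a reference step keeping the best match as an Option, used to bridge the two ports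
def pvStep {α : Type} (p : α → Bool) (len : α → Int) (best : Option α) (a : α) : Option α :=
  if p a && (match best with | none => true | some h => decide (len h < len a))
  then some a else best

-- "h is the best match in L": p holds, and every other match is shorter, or as long but later in L
def pvBest {α : Type} [BEq α] [LawfulBEq α] (p : α → Bool) (len : α → Int) (L : List α) (h : α) : Prop :=
  p h = true ∧ h ∈ L ∧
    ∀ b ∈ L, p b = true → b ≠ h → (len b < len h ∨ (len h = len b ∧ L.idxOf h < L.idxOf b))

theorem pvBest_unique {α : Type} [BEq α] [LawfulBEq α] (p : α → Bool) (len : α → Int)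
    (L : List α) (h1 h2 : α) (hb1 : pvBest p len L h1) (hb2 : pvBest p len L h2) : h1 = h2 := by
  by_contra hne
  obtain ⟨hp1, hm1, hall1⟩ := hb1
  obtain ⟨hp2, hm2, hall2⟩ := hb2
  have h12 := hall1 h2 hm2 hp2 (Ne.symm hne)
  have h21 := hall2 h1 hm1 hp1 hne
  omega

theorem pvFold_spec {α : Type} [BEq α] [LawfulBEq α] (p : α → Bool) (len : α → Int)
    (L : List α) (hnd : L.Nodup) :
    (L.foldl (pvStep p len) none = none → ∀ b ∈ L, p b = false) ∧
    (∀ h, L.foldl (pvStep p len) none = some h → pvBest p len L h) := by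
  induction L using List.reverseRecOn with
  | nil => simp
  | append_singleton L a ih =>
    have hnd' : L.Nodup := (List.nodup_append.mp hnd).1
    have hna : a ∉ L := fun hmem =>
      (List.nodup_append.mp hnd).2.2 a hmem a (List.mem_singleton_self a) rfl
    rw [List.foldl_append]
    simp only [List.foldl_cons, List.foldl_nil]
    cases hf : L.foldl (pvStep p len) none with
    | none =>
      have hnone := (ih hnd').1 hf
      cases hpa : p a with
      | false =>
        constructor
        · intro _ b hb
          rcases List.mem_append.mp hb with hb | hb
          · exact hnone b hb
          · rw [List.mem_singleton.mp hb]; exact hpa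
        · intro c hc
          exfalso
          simp [pvStep, hpa] at hc
      | true =>
        constructor
        · intro hc
          exfalso
          simp [pvStep, hpa] at hc
        · intro c hc
          have hca : c = a := by simpa [pvStep, hpa] using hc.symm
          subst hca
          refine ⟨hpa, by simp, ?_⟩
          intro b hb hpb hbne
          exfalso
          rcases List.mem_append.mp hb with hb | hb
          · rw [hnone b hb] at hpb; cases hpb
          · exact hbne (List.mem_singleton.mp hb)
    | some h =>
      obtain ⟨hph, hmh, hallh⟩ := (ih hnd').2 h hf
      have hidxh : (L ++ [a]).idxOf h = L.idxOf h := by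
        rw [List.idxOf_append, if_pos hmh]
      by_cases hrepl : p a = true ∧ len h < len a
      · have hstep : pvStep p len (some h) a = some a := by
          simp [pvStep, hrepl.1, hrepl.2]
        rw [hstep]
        constructor
        · intro hc; cases hc
        · intro c hc
          have hca : c = a := by simpa using hc.symm
          subst hca
          refine ⟨hrepl.1, by simp, ?_⟩
          intro b hb hpb hbne
          left
          rcases List.mem_append.mp hb with hb | hb
          · by_cases hbh : b = h
            · subst hbh; exact hrepl.2
            · rcases hallh b hb hpb hbh with hlt | ⟨heq, _⟩
              · omega
              · omega
          · exact absurd (List.mem_singleton.mp hb) hbne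
      · have hcond : (p a && decide (len h < len a)) = false := by
          cases hpa : p a with
          | false => simp
          | true =>
            have : ¬ len h < len a := fun hl => hrepl ⟨hpa, hl⟩
            simp [this]
        have hstep : pvStep p len (some h) a = some h := by
          simp [pvStep, hcond]
        rw [hstep]
        constructor
        · intro hc; cases hc
        · intro c hc
          have hch : c = h := by simpa using hc.symm
          subst hch
          refine ⟨hph, List.mem_append_left _ hmh, ?_⟩
          intro b hb hpb hbne
          rcases List.mem_append.mp hb with hb | hb
          · have hidxb : (L ++ [a]).idxOf b = L.idxOf b := by
              rw [List.idxOf_append, if_pos hb]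
            rcases hallh b hb hpb hbne with hlt | ⟨heq, hidx⟩
            · exact Or.inl hlt
            · exact Or.inr ⟨heq, by rw [hidxh, hidxb]; exact hidx⟩
          · have hba : b = a := List.mem_singleton.mp hb
            have hle : ¬ len c < len b := by
              intro hl
              rw [hba] at hpb hl
              exact hrepl ⟨hpb, hl⟩
            rcases lt_or_eq_of_le (by omega : len b ≤ len c) with hlt | heq
            · exact Or.inl hlt
            · refine Or.inr ⟨heq.symm, ?_⟩
              rw [hidxh, hba, List.idxOf_append, if_neg hna]
              have := List.idxOf_lt_length_of_mem hmh
              omega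

theorem pvFind_spec {α : Type} [BEq α] [LawfulBEq α] (p : α → Bool) (len : α → Int)
    (L L' : List α) (hperm : L'.Perm L)
    (hord : L'.Pairwise (fun x y => len y < len x ∨ (len x = len y ∧ L.idxOf x < L.idxOf y))) :
    (L'.find? p = none → ∀ b ∈ L, p b = false) ∧
    (∀ h, L'.find? p = some h → pvBest p len L h) := by
  constructor
  · intro hf b hb
    have := List.find?_eq_none.mp hf b (hperm.mem_iff.mpr hb)
    simpa using this
  · intro h hf
    obtain ⟨hp, as, bs, hdec, hfail⟩ := List.find?_eq_some_iff_append.mp hf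
    refine ⟨hp, hperm.mem_iff.mp (by rw [hdec]; simp), ?_⟩
    intro b hbL hpb hbne
    have hbL' : b ∈ L' := hperm.mem_iff.mpr hbL
    rw [hdec] at hbL' hord
    rcases List.mem_append.mp hbL' with hbas | hbc
    · exact absurd hpb (by simpa using hfail b hbas)
    · rcases List.mem_cons.mp hbc with hbh | hbbs
      · exact absurd hbh hbne
      · have hpw := (List.pairwise_append.mp hord).2.1
        exact (List.pairwise_cons.mp hpw).1 b hbbs

-- the concrete table facts, by evaluation
theorem pvKeysNodup : (pvTbl.map Prod.fst).Nodup := by decide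

set_option maxRecDepth 10000 in
set_option maxHeartbeats 1000000 in
theorem pvSortedOrd :
    (PySem.List.sorted pvTbl (fun kv => PySem.Str.len kv.1) true).Pairwise
      (fun x y => PySem.Str.len y.1 < PySem.Str.len x.1 ∨
        (PySem.Str.len x.1 = PySem.Str.len y.1 ∧ pvTbl.idxOf x < pvTbl.idxOf y)) := by decide

set_option maxHeartbeats 1000000 in
theorem pvFoldEq (s : String) (h : String × String)
    (hb : pvBest (fun kv => PySem.Str.isIn kv.1 s) (fun kv => PySem.Str.len kv.1) pvTbl h) :
    pvTbl.foldl (pvStep (fun kv => PySem.Str.isIn kv.1 s) (fun kv => PySem.Str.len kv.1)) none = some h := by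
  have hfold := pvFold_spec (fun kv => PySem.Str.isIn kv.1 s) (fun kv => PySem.Str.len kv.1)
    pvTbl (List.Nodup.of_map Prod.fst pvKeysNodup)
  cases hg : pvTbl.foldl (pvStep (fun kv => PySem.Str.isIn kv.1 s) (fun kv => PySem.Str.len kv.1)) none with
  | none =>
    have := hfold.1 hg h hb.2.1
    rw [hb.1] at this; cases this
  | some h' =>
    rw [pvBest_unique _ _ pvTbl h' h (hfold.2 h' hg) hb]

-- no direct match: the first hit in the (stable, longest-first) sorted list = the fold's best
set_option maxHeartbeats 1000000 in
theorem pvCore (s : String) :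
    (match (PySem.List.sorted pvTbl (fun kv => PySem.Str.len kv.1) true).find?
        (fun kv => PySem.Str.isIn kv.1 s) with
     | some kv => kv.2 | none => "general")
    = (match pvTbl.foldl (pvStep (fun kv => PySem.Str.isIn kv.1 s) (fun kv => PySem.Str.len kv.1)) none with
     | some kv => kv.2 | none => "general") := by
  have hfind := pvFind_spec (fun kv => PySem.Str.isIn kv.1 s) (fun kv => PySem.Str.len kv.1)
    pvTbl _ (PySem.List.sorted_perm pvTbl (fun kv => PySem.Str.len kv.1) true) pvSortedOrd
  cases hf : (PySem.List.sorted pvTbl (fun kv => PySem.Str.len kv.1) true).find?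
      (fun kv => PySem.Str.isIn kv.1 s) with
  | none =>
    cases hg : pvTbl.foldl (pvStep (fun kv => PySem.Str.isIn kv.1 s) (fun kv => PySem.Str.len kv.1)) none with
    | none => rfl
    | some h =>
      have hfold := pvFold_spec (fun kv => PySem.Str.isIn kv.1 s) (fun kv => PySem.Str.len kv.1)
        pvTbl (List.Nodup.of_map Prod.fst pvKeysNodup)
      obtain ⟨hph, hmh, _⟩ := hfold.2 h hg
      rw [hfind.1 hf h hmh] at hph; cases hph
  | some h =>
    rw [pvFoldEq s h (hfind.2 h hf)]

-- a direct dict hit is also the unique best substring match (any other match is strictly shorter)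
set_option maxHeartbeats 1000000 in
theorem pvDirect (s : String) (kv : String × String)
    (hf : pvTbl.find? (fun x => x.1 == s) = some kv) :
    pvBest (fun x => PySem.Str.isIn x.1 s) (fun x => PySem.Str.len x.1) pvTbl kv := by
  obtain ⟨hpkv, as, bs, hdec, _⟩ := List.find?_eq_some_iff_append.mp hf
  have hks : kv.1 = s := by simpa using hpkv
  have hmem : kv ∈ pvTbl := by rw [hdec]; simp
  refine ⟨?_, hmem, ?_⟩
  · show PySem.Str.isIn kv.1 s = true
    rw [hks]
    exact (PySem.Str.isIn_iff_infix s s).mpr (List.infix_refl _)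
  · intro b hb hpb hbne
    left
    have hinf : b.1.toList <:+: s.toList := (PySem.Str.isIn_iff_infix _ _).mp hpb
    have hlen : b.1.toList.length ≤ s.toList.length := hinf.length_le
    have hlt : b.1.toList.length < s.toList.length := by
      rcases lt_or_eq_of_le hlen with hcase | hcase
      · exact hcase
      · exfalso
        have heq : b.1.toList = s.toList := hinf.eq_of_length hcase
        have hb1 : b.1 = s := by
          have := congrArg String.ofList heq
          simpa using this
        exact hbne (List.inj_on_of_nodup_map pvKeysNodup hb hmem (hb1.trans hks.symm))
    show PySem.Str.len b.1 < PySem.Str.len kv.1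
    rw [PySem.Str.len_eq, PySem.Str.len_eq, hks]
    exact_mod_cast hlt

-- A's branch structure equals the Option-best fold over pvTbl
set_option maxHeartbeats 1000000 in
theorem pvAEq (s : String) :
    (match pvTbl.find? (fun kv => kv.1 == s) with
     | some kv => kv.2
     | none =>
       match (PySem.List.sorted pvTbl (fun kv => PySem.Str.len kv.1) true).find?
           (fun kv => PySem.Str.isIn kv.1 s) with
       | some kv => kv.2 | none => "general")
    = (match pvTbl.foldl (pvStep (fun kv => PySem.Str.isIn kv.1 s) (fun kv => PySem.Str.len kv.1)) none with
     | some kv => kv.2 | none => "general") := by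
  cases hfd : pvTbl.find? (fun kv => kv.1 == s) with
  | none => exact pvCore s
  | some kv => rw [pvFoldEq s kv (pvDirect s kv hfd)]

-- B's integer-accumulator step over a flat (key, vertical) list
def pvStepI (s : String) (st : Int × String) (kv : String × String) : Int × String :=
  if decide (st.1 < PySem.Str.len kv.1) && PySem.Str.isIn kv.1 s
  then (PySem.Str.len kv.1, kv.2) else st

-- the same step, generic in the match predicate and lengths
def pvStepG {α : Type} (p : α → Bool) (len : α → Int) (vert : α → String)
    (st : Int × String) (a : α) : Int × String :=
  if decide (st.1 < len a) && p a then (len a, vert a) else st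

theorem pvStepI_eq (s : String) :
    pvStepI s = pvStepG (fun kv => PySem.Str.isIn kv.1 s) (fun kv => PySem.Str.len kv.1) Prod.snd := by
  funext st kv; rfl

-- the (best_len, best_vert) fold simulates the Option-best fold (items have positive length)
theorem pvIntFold {α : Type} (p : α → Bool) (len : α → Int) (vert : α → String) (L : List α)
    (hpos : ∀ a ∈ L, 0 < len a) :
    ∀ (opt : Option α) (st : Int × String),
      (opt = none → st = (0, "general")) →
      (∀ a, opt = some a → st = (len a, vert a)) →
      (L.foldl (pvStepG p len vert) st).2
        = (match L.foldl (pvStep p len) opt with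
           | some a => vert a | none => "general") := by
  induction L with
  | nil =>
    intro opt st h0 h1
    cases opt with
    | none => simp [h0 rfl]
    | some a => simp [h1 a rfl]
  | cons a L ih =>
    intro opt st h0 h1
    have hpa : 0 < len a := hpos a (List.mem_cons_self ..)
    have hpos' : ∀ b ∈ L, 0 < len b := fun b hb => hpos b (List.mem_cons_of_mem a hb)
    simp only [List.foldl_cons]
    cases opt with
    | none =>
      rw [h0 rfl]
      cases hp : p a with
      | false =>
        have hsI : pvStepG p len vert (0, "general") a = (0, "general") := by
          simp [pvStepG, hp]
        have hsO : pvStep p len none a = none := by simp [pvStep, hp]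
        rw [hsI, hsO]
        exact ih hpos' none (0, "general") (fun _ => rfl) (fun b h => by cases h)
      | true =>
        have hsI : pvStepG p len vert (0, "general") a = (len a, vert a) := by
          simp [pvStepG, hp, hpa]
        have hsO : pvStep p len none a = some a := by simp [pvStep, hp]
        rw [hsI, hsO]
        exact ih hpos' (some a) _ (fun h => by cases h) (fun b h => by cases h; rfl)
    | some b =>
      rw [h1 b rfl]
      by_cases hc : len b < len a ∧ p a = true
      · have hsI : pvStepG p len vert (len b, vert b) a = (len a, vert a) := by
          simp [pvStepG, hc.1, hc.2]
        have hsO : pvStep p len (some b) a = some a := by simp [pvStep, hc.1, hc.2]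
        rw [hsI, hsO]
        exact ih hpos' (some a) _ (fun h => by cases h) (fun c h => by cases h; rfl)
      · have hcond : (decide (len b < len a) && p a) = false := by
          cases hp : p a with
          | false => simp
          | true =>
            have : ¬ len b < len a := fun hl => hc ⟨hl, hp⟩
            simp [this]
        have hsI : pvStepG p len vert (len b, vert b) a = (len b, vert b) := by
          simp only [pvStepG, hcond, Bool.false_eq_true, if_false]
        have hsO : pvStep p len (some b) a = some b := by
          have : (p a && decide (len b < len a)) = false := by
            rw [Bool.and_comm]; exact hcond
          simp only [pvStep, this, Bool.false_eq_true, if_false]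
        rw [hsI, hsO]
        exact ih hpos' (some b) _ (fun h => by cases h) (fun c h => by cases h; rfl)

-- B's grouped comma-separated table flattens exactly to A's dict items, in order
set_option maxRecDepth 10000 in
theorem pvGroupsFlat :
    pvGroups.flatMap (fun vk => ((PySem.Str.split? vk.2 ",").getD []).map (fun k => (k, vk.1))) = pvTbl := by
  decide

theorem pvTblPos : ∀ kv ∈ pvTbl, 0 < PySem.Str.len kv.1 := by decide

-- B's nested fold = one fold over the flattened table
theorem pvNested (s : String) (st : Int × String) :
    pvGroups.foldl (fun st vk =>
        ((PySem.Str.split? vk.2 ",").getD []).foldl (fun st k =>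
            if decide (st.1 < PySem.Str.len k) && PySem.Str.isIn k s
            then (PySem.Str.len k, vk.1) else st) st) st
      = (pvGroups.flatMap (fun vk => ((PySem.Str.split? vk.2 ",").getD []).map (fun k => (k, vk.1)))).foldl
          (pvStepI s) st := by
  induction pvGroups generalizing st with
  | nil => rfl
  | cons g gs ih =>
    simp only [List.flatMap_cons, List.foldl_cons, List.foldl_append, List.foldl_map, ih]
    rfl

-- ===== VERDICT (by name: the statement is the Claim_ definition above) =====
set_option maxHeartbeats 1000000 in
theorem business_to_vertical_py_spec : Claim_equal_business_to_vertical_py := by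
  intro bt _
  unfold Spec_business_to_vertical_py business_to_vertical_py business_to_vertical_py_alt
  by_cases hbt : bt = ""
  · simp [hbt]
  · simp only [if_neg hbt]
    rw [pvNested, pvGroupsFlat, pvStepI_eq,
      pvIntFold (fun kv => PySem.Str.isIn kv.1 (PySem.Str.strip (PySem.Str.lower bt)))
        (fun kv => PySem.Str.len kv.1) Prod.snd pvTbl pvTblPos none (0, "general")
        (fun _ => rfl) (fun kv h => by cases h), pvAEq]
    cases pvTbl.foldl (pvStep (fun kv => PySem.Str.isIn kv.1 (PySem.Str.strip (PySem.Str.lower bt)))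
        (fun kv => PySem.Str.len kv.1)) none with
    | none => rfl
    | some kv => rfl
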